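-- pv_equiv track=rewrite | github.com/BrainlessNinja/lab3 | functions/task4.py | filter_prime
-- ===== SOURCE A (Python) =====
-- def filter_prime(numbers):
--     for num in numbers:
--         if num > 1:
--             for i in range(2, int(num/2)+1):
--                 if (num % i) == 0:
--
--                     break
--             else:
--                 return num
-- ===== SOURCE B (Python) =====
-- def filter_prime(numbers):
--     for num in numbers:
--         if num > 1:
--             i = 2
--             prime = True
--             while i * i <= num:
--                 if num % i == 0:
--                     prime = False
--                     break
--                 i += 1
--             if prime:
--                 return num
--     return None
-- ===== Notes on version B (the rewrite author's own statement) =====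
-- stated objective: alternative
-- what changed: the primality scan tries divisors only while i*i <= num (explicit while-loop with early exit) instead of iterating over range(2, num//2 + 1)
import Mathlib
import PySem

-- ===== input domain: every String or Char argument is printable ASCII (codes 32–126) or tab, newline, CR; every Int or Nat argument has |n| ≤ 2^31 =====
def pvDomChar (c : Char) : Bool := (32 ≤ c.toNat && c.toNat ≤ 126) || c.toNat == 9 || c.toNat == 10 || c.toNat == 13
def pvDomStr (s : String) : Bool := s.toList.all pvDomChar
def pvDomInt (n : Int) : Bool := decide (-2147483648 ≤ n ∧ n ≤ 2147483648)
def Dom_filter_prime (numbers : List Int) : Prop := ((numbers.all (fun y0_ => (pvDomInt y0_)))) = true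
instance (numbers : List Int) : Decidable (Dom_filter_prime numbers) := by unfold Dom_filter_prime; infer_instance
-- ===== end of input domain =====

-- B changes the primality scan: divisors are tried only while i*i <= num instead of over range(2, num//2 + 1).

-- ===== PORT A =====
-- int(num/2) = num // 2 for the positive num this branch sees (num > 1; exact on the domain);
-- the inner for-else is: any divisor in range(2, num//2 + 1) → continue, none → return num.
def filter_prime : List Int → Option Int
  | [] => none
  | num :: rest =>
    if num > 1 then
      if (PySem.List.pyRange 2 (PySem.Int.floordiv num 2 + 1) 1).any
          (fun i => PySem.Int.mod num i == 0) then
        filter_prime rest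
      else some num
    else filter_prime rest

-- ===== PORT B =====
-- the while-loop of Source B: returns true iff no divisor i with i*i ≤ num is found from i upward
def pvTrial (num : Int) (i : Nat) : Bool :=
  if _h : (i : Int) * i ≤ num then
    if PySem.Int.mod num i == 0 then false
    else pvTrial num (i + 1)
  else true
termination_by (num + 1 - (i : Int) * i).toNat
decreasing_by
  have h2 : (i : Int) * i < ((i + 1 : Nat) : Int) * ((i + 1 : Nat) : Int) := by
    push_cast; nlinarith [Int.natCast_nonneg i]
  omega

def filter_prime_alt : List Int → Option Int
  | [] => none
  | num :: rest =>
    if num > 1 then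
      if pvTrial num 2 then some num
      else filter_prime_alt rest
    else filter_prime_alt rest

-- ===== PRECONDITION & SPEC =====
def Spec_filter_prime (numbers : List Int) (out : Option Int) : Prop := out = filter_prime_alt numbers
instance (numbers : List Int) (out : Option Int) : Decidable (Spec_filter_prime numbers out) := by unfold Spec_filter_prime; infer_instance

-- ===== CLAIM (what is proved, stated in full; the proofs are below) =====
def Claim_equal_filter_prime : Prop := ∀ (numbers : List Int), Dom_filter_prime numbers → Spec_filter_prime numbers (filter_prime numbers)

-- ===== LEMMAS AND PROOFS =====

-- A's inner scan finds a divisor iff one exists in [2, num//2]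
theorem pvAnyA_iff (num : Int) (_h : 1 < num) :
    ((PySem.List.pyRange 2 (PySem.Int.floordiv num 2 + 1) 1).any
        (fun i => PySem.Int.mod num i == 0) = true)
      ↔ ∃ i : Int, 2 ≤ i ∧ i ≤ num / 2 ∧ num % i = 0 := by
  rw [List.any_eq_true]
  constructor
  · rintro ⟨i, hm, hdiv⟩
    rw [PySem.List.mem_pyRange_one] at hm
    refine ⟨i, hm.1, ?_, ?_⟩
    · rw [PySem.Int.floordiv_eq_ediv_of_pos (by omega)] at hm; omega
    · simpa [PySem.Int.mod_eq_emod_of_pos (by omega : (0:Int) < i)] using hdiv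
  · rintro ⟨i, h2, hle, hmod⟩
    refine ⟨i, ?_, ?_⟩
    · rw [PySem.List.mem_pyRange_one, PySem.Int.floordiv_eq_ediv_of_pos (by omega)]
      omega
    · simpa [PySem.Int.mod_eq_emod_of_pos (by omega : (0:Int) < i)] using hmod

-- B's while-loop from i finds a divisor iff one exists with k ≥ i and k*k ≤ num
theorem pvTrial_false_iff (num : Int) (i : Nat) :
    pvTrial num i = false ↔
      ∃ k : Nat, i ≤ k ∧ (k : Int) * k ≤ num ∧ PySem.Int.mod num (k : Int) = 0 := by
  induction i using pvTrial.induct (num := num) with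
  | case1 i hle hdiv =>
    rw [pvTrial, dif_pos hle, if_pos hdiv]
    exact ⟨fun _ => ⟨i, le_refl _, hle, by simpa using hdiv⟩, fun _ => rfl⟩
  | case2 i hle hdiv ih =>
    rw [pvTrial, dif_pos hle, if_neg hdiv, ih]
    constructor
    · rintro ⟨k, hk, hkk, hkm⟩; exact ⟨k, by omega, hkk, hkm⟩
    · rintro ⟨k, hk, hkk, hkm⟩
      refine ⟨k, ?_, hkk, hkm⟩
      rcases Nat.eq_or_lt_of_le hk with heq | hlt
      · exact absurd (by rw [heq]; simpa using hkm) hdiv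
      · omega
  | case3 i hgt =>
    rw [pvTrial, dif_neg hgt]
    constructor
    · intro h; exact absurd h (by simp)
    · rintro ⟨k, hk, hkk, _⟩
      exfalso
      have hik : (i : Int) ≤ (k : Int) := by exact_mod_cast hk
      have : (i : Int) * i ≤ (k : Int) * k := by nlinarith [Int.natCast_nonneg i]
      omega

-- the number-theoretic core: a divisor ≤ num/2 exists iff one with square ≤ num exists
theorem pvDiv_iff (num : Int) (h : 1 < num) :
    (∃ i : Int, 2 ≤ i ∧ i ≤ num / 2 ∧ num % i = 0)
      ↔ ∃ k : Nat, 2 ≤ k ∧ (k : Int) * k ≤ num ∧ PySem.Int.mod num (k : Int) = 0 := by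
  constructor
  · rintro ⟨i, h2, hle, hmod⟩
    have hi : 0 < i := by omega
    have h2i : 2 * i ≤ num := by
      rw [Int.le_ediv_iff_mul_le (by norm_num : (0:Int) < 2)] at hle; linarith
    by_cases hsq : i * i ≤ num
    · refine ⟨i.toNat, by omega, ?_, ?_⟩
      · rw [Int.toNat_of_nonneg (by omega)]; exact hsq
      · rw [Int.toNat_of_nonneg (by omega),
            PySem.Int.mod_eq_emod_of_pos (by omega : (0:Int) < i)]
        exact hmod
    · rw [not_le] at hsq
      set j := num / i with hj
      have hdvd : i ∣ num := Int.dvd_of_emod_eq_zero hmod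
      have hij : i * j = num := by rw [hj]; exact Int.mul_ediv_cancel' hdvd
      have hj2 : 2 ≤ j := by
        rw [hj, Int.le_ediv_iff_mul_le hi]; linarith
      have hji : j < i := by nlinarith
      refine ⟨j.toNat, by omega, ?_, ?_⟩
      · rw [Int.toNat_of_nonneg (by omega)]; nlinarith
      · rw [Int.toNat_of_nonneg (by omega),
            PySem.Int.mod_eq_emod_of_pos (by omega : (0:Int) < j)]
        exact Int.emod_eq_zero_of_dvd ⟨i, by rw [← hij]; ring⟩
  · rintro ⟨k, h2, hsq, hmod⟩
    have h2k : (2:Int) ≤ (k:Int) := by exact_mod_cast h2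
    refine ⟨(k : Int), h2k, ?_, ?_⟩
    · rw [Int.le_ediv_iff_mul_le (by norm_num : (0:Int) < 2)]; nlinarith
    · rw [← PySem.Int.mod_eq_emod_of_pos (by omega : (0:Int) < (k:Int))]; exact hmod

-- per-element agreement of the two primality scans
theorem pvScan_eq (num : Int) (h : 1 < num) :
    ((PySem.List.pyRange 2 (PySem.Int.floordiv num 2 + 1) 1).any
        (fun i => PySem.Int.mod num i == 0)) = !(pvTrial num 2) := by
  rcases hb : pvTrial num 2 with _ | _
  · rw [pvTrial_false_iff] at hb
    simp only [Bool.not_false]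
    rw [pvAnyA_iff num h, pvDiv_iff num h]
    exact hb
  · have hb' : ¬ pvTrial num 2 = false := by simp [hb]
    rw [pvTrial_false_iff] at hb'
    simp only [Bool.not_true]
    rw [← Bool.not_eq_true, pvAnyA_iff num h, pvDiv_iff num h]
    exact hb'

-- ===== VERDICT (by name: the statement is the Claim_ definition above) =====
theorem pv_total_eq (numbers : List Int) : filter_prime numbers = filter_prime_alt numbers := by
  induction numbers with
  | nil => rfl
  | cons num rest ih =>
    rw [filter_prime, filter_prime_alt]
    by_cases h : num > 1
    · simp only [h, if_pos]
      rw [pvScan_eq num h]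
      rcases hb : pvTrial num 2 with _ | _ <;> simp [ih]
    · simp only [h, if_false]
      exact ih

theorem filter_prime_spec : Claim_equal_filter_prime := by
  intro numbers _
  exact pv_total_eq numbers
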